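-- pv_equiv track=rewrite | github.com/ultralightbeat/crime_statistics | main.py | get_crime_prediction
-- ===== SOURCE A (Python) =====
-- def get_crime_prediction(x, y: list, prediction_years_count, extrapolation):
--     new_x = [i for i in range(2023, 2023 + prediction_years_count)]
--     predicted_y = []
--     new_y = y.copy()
--     for i in range(prediction_years_count):
--         new_y.append(sum(new_y[-extrapolation:]) // extrapolation)
--         predicted_y.append(sum(new_y[-extrapolation:]) // extrapolation)
--     return new_x, predicted_y
-- ===== SOURCE B (Python) =====
-- def get_crime_prediction(x, y: list, prediction_years_count, extrapolation):
--     new_x = list(range(2023, 2023 + prediction_years_count))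
--     # circular buffer of the trailing window, its running sum s and fill count k:
--     # each predicted year costs O(1) instead of A's re-summing of the slice
--     buf = y[-extrapolation:]
--     k = len(buf)
--     s = sum(buf)
--     pos = 0
--     predicted_y = []
--     for _ in range(max(prediction_years_count, 0)):
--         v = s // extrapolation
--         if k < extrapolation:
--             buf.append(v)
--             k += 1
--             s += v
--         else:
--             s += v - buf[pos]
--             buf[pos] = v
--             pos = (pos + 1) % extrapolation
--         predicted_y.append(s // extrapolation)
--     return new_x, predicted_y
-- ===== Notes on version B (the rewrite author's own statement) =====
-- stated objective: faster
-- what changed: B replaces A's per-iteration re-summing of the trailing slice with a circular buffer holding the window and a running sum updated in O(1) per predicted year.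
-- outside the precondition, e.g. on get_crime_prediction([], [1, 2, 3], 1, -2): A returns ([2023], [-1]), B returns ([2023], [1]); on get_crime_prediction([], [1], 1, 0): A raises ZeroDivisionError, B raises ZeroDivisionError
import Mathlib
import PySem

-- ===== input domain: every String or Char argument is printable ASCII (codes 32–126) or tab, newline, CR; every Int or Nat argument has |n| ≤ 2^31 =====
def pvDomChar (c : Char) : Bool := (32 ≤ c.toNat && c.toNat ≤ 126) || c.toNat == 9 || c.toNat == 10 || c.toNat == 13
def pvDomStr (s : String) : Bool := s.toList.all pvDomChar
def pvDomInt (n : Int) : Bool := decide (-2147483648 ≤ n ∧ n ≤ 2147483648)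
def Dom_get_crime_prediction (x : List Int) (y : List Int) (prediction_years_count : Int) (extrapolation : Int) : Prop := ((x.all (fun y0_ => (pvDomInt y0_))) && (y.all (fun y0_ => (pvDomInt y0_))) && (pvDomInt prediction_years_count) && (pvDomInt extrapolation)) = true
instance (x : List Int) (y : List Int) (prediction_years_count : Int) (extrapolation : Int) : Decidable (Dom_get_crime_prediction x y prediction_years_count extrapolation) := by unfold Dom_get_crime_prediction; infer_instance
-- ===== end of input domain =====

-- B replaces A's per-year re-summing of the trailing slice by a circular buffer with a
-- running sum (O(1) per predicted year); proved equal to A whenever extrapolation >= 1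
-- or the loop never runs.


-- ===== PORT A =====
-- Python lists are dynamic arrays, so both ports carry their list state as Array Int
-- (push = Python's O(1) append).  pvArrTail a e is the slice a[-e:] on arrays; it is
-- exact for every Int e (lemma pvArrTail_toList equates it with PySem.List.slice).
def pvArrTail (a : Array Int) (e : Int) : Array Int :=
  a.extract (PySem.List.clampIdx a.size (-e)) a.size

def get_crime_prediction (x : List Int) (y : List Int) (prediction_years_count : Int) (extrapolation : Int) : List Int × List Int :=
  let new_x := PySem.List.pyRange 2023 (2023 + prediction_years_count) 1
  let st := (PySem.List.pyRange 0 prediction_years_count 1).foldl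
    (fun (st : Array Int × Array Int) _ =>
      let new_y := st.1.push (PySem.Int.floordiv (pvArrTail st.1 extrapolation).sum extrapolation)
      (new_y, st.2.push (PySem.Int.floordiv (pvArrTail new_y extrapolation).sum extrapolation)))
    (y.toArray, #[])
  (new_x, st.2.toList)

-- ===== PORT B =====
-- buf[pos] read/write is ported with Array.getD / Array.setIfInBounds at index
-- pos.toNat (exact here: Source B keeps 0 <= pos < len(buf) whenever this branch runs
-- under Pre_, so no Python IndexError and no wraparound arises).
def get_crime_prediction_alt (x : List Int) (y : List Int) (prediction_years_count : Int) (extrapolation : Int) : List Int × List Int :=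
  let new_x := PySem.List.pyRange 2023 (2023 + prediction_years_count) 1
  let buf0 := pvArrTail y.toArray extrapolation
  let st := (PySem.List.pyRange 0 (max prediction_years_count 0) 1).foldl
    (fun (st : Array Int × Int × Int × Int × Array Int) _ =>
      let v := PySem.Int.floordiv st.2.2.1 extrapolation
      if st.2.1 < extrapolation then
        (st.1.push v, st.2.1 + 1, st.2.2.1 + v, st.2.2.2.1,
          st.2.2.2.2.push (PySem.Int.floordiv (st.2.2.1 + v) extrapolation))
      else
        (st.1.setIfInBounds st.2.2.2.1.toNat v, st.2.1,
          st.2.2.1 + v - st.1.getD st.2.2.2.1.toNat 0,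
          PySem.Int.mod (st.2.2.2.1 + 1) extrapolation,
          st.2.2.2.2.push (PySem.Int.floordiv (st.2.2.1 + v - st.1.getD st.2.2.2.1.toNat 0) extrapolation)))
    (buf0, (buf0.size : Int), buf0.sum, 0, #[])
  (new_x, st.2.2.2.2.toList)

-- ===== PRECONDITION & SPEC =====
-- Pre_ excludes extrapolation ≤ 0 with a positive year count: there A divides by zero
-- (ZeroDivisionError for extrapolation = 0) or applies the negative "window size" as an
-- accidental ever-growing slice with a negative divisor, outside the function's natural
-- domain of a positive trailing-window length.
def Pre_get_crime_prediction (x : List Int) (y : List Int) (prediction_years_count : Int) (extrapolation : Int) : Prop :=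
  1 ≤ extrapolation ∨ prediction_years_count ≤ 0
instance (x : List Int) (y : List Int) (prediction_years_count : Int) (extrapolation : Int) : Decidable (Pre_get_crime_prediction x y prediction_years_count extrapolation) := by unfold Pre_get_crime_prediction; infer_instance
def pvWitness_get_crime_prediction : List Int × List Int × Int × Int := ([], [4, 8, 15], 3, 2)

def Spec_get_crime_prediction (x : List Int) (y : List Int) (prediction_years_count : Int) (extrapolation : Int) (out : List Int × List Int) : Prop := out = get_crime_prediction_alt x y prediction_years_count extrapolation
instance (x : List Int) (y : List Int) (prediction_years_count : Int) (extrapolation : Int) (out : List Int × List Int) : Decidable (Spec_get_crime_prediction x y prediction_years_count extrapolation out) := by unfold Spec_get_crime_prediction; infer_instance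

-- ===== CLAIM (what is proved, stated in full; the proofs are below) =====
def Claim_equal_get_crime_prediction : Prop := ∀ (x : List Int) (y : List Int) (prediction_years_count : Int) (extrapolation : Int), Dom_get_crime_prediction x y prediction_years_count extrapolation → Pre_get_crime_prediction x y prediction_years_count extrapolation → Spec_get_crime_prediction x y prediction_years_count extrapolation (get_crime_prediction x y prediction_years_count extrapolation)

-- ===== LEMMAS AND PROOFS =====

-- A's loop body, as a function of the carried state (new_y, predicted_y).
def pvStepA (e : Int) (st : List Int × List Int) : List Int × List Int :=
  let new_y := st.1 ++ [PySem.Int.floordiv (PySem.List.slice st.1 (some (-e)) none).sum e]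
  (new_y, st.2 ++ [PySem.Int.floordiv (PySem.List.slice new_y (some (-e)) none).sum e])

-- B's loop body, state (buf, k, s, pos, predicted_y).
def pvStepB (e : Int) (st : List Int × Int × Int × Int × List Int) : List Int × Int × Int × Int × List Int :=
  let v := PySem.Int.floordiv st.2.2.1 e
  if st.2.1 < e then
    (st.1 ++ [v], st.2.1 + 1, st.2.2.1 + v, st.2.2.2.1,
      st.2.2.2.2 ++ [PySem.Int.floordiv (st.2.2.1 + v) e])
  else
    (st.1.set st.2.2.2.1.toNat v, st.2.1,
      st.2.2.1 + v - st.1.getD st.2.2.2.1.toNat 0,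
      PySem.Int.mod (st.2.2.2.1 + 1) e,
      st.2.2.2.2 ++ [PySem.Int.floordiv (st.2.2.1 + v - st.1.getD st.2.2.2.1.toNat 0) e])

-- the trailing window of (at most) e elements of a list
def pvW (e : Int) (l : List Int) : List Int := l.drop (l.length - e.toNat)

lemma pvFoldl_const {α σ : Type} (f : σ → σ) (l : List α) : ∀ (s : σ),
    l.foldl (fun s _ => f s) s = f^[l.length] s := by
  induction l with
  | nil => intro s; rfl
  | cons a t ih => intro s; simp [List.foldl_cons, ih, Function.iterate_succ_apply]

lemma pvSlice_eq_W (e : Int) (he : 1 ≤ e) (l : List Int) :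
    PySem.List.slice l (some (-e)) none = pvW e l := by
  have h : e = ((e.toNat : Nat) : Int) := by omega
  rw [h, PySem.List.slice_from_neg_natCast _ _ (by omega)]
  rfl

-- simulation invariant between A's state (new_y = ay) and B's state (buf, s, pos)
def pvInv (e : Int) (ay buf : List Int) (k s pos : Int) : Prop :=
  k = (buf.length : Int) ∧ s = (pvW e ay).sum ∧
  ((buf = ay ∧ (ay.length : Int) < e ∧ pos = 0) ∨
   (∃ T d R, buf = T ++ d :: R ∧ (T.length : Int) = pos ∧ (buf.length : Int) = e ∧
      pvW e ay = (d :: R) ++ T))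

lemma pvW_small {e : Int} {l : List Int} (h : l.length ≤ e.toNat) : pvW e l = l := by
  unfold pvW
  have h0 : l.length - e.toNat = 0 := by omega
  simp [h0]

lemma pvW_append {e : Int} (he : 1 ≤ e) {l : List Int} (h : e.toNat ≤ l.length) (v : Int) :
    pvW e (l ++ [v]) = (pvW e l).tail ++ [v] := by
  unfold pvW
  have h1 : (l ++ [v]).length - e.toNat = (l.length - e.toNat) + 1 := by simp; omega
  rw [h1, List.drop_append_of_le_length (by omega), ← List.drop_drop]
  simp [List.tail_drop]

lemma pvStepA_eq (e : Int) (he : 1 ≤ e) (ay p : List Int) (s : Int)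
    (hs : s = (pvW e ay).sum) :
    pvStepA e (ay, p) =
      (ay ++ [PySem.Int.floordiv s e],
        p ++ [PySem.Int.floordiv (pvW e (ay ++ [PySem.Int.floordiv s e])).sum e]) := by
  simp only [pvStepA, pvSlice_eq_W e he, hs]

-- one step of the simulation
lemma pvStep_pres (e : Int) (he : 1 ≤ e) (ay buf : List Int) (k s pos : Int)
    (hI : pvInv e ay buf k s pos) :
    ∃ q buf' k' s' pos',
      (∀ p, pvStepB e (buf, k, s, pos, p) = (buf', k', s', pos', p ++ [q])) ∧
      (∀ p, pvStepA e (ay, p) = (ay ++ [PySem.Int.floordiv s e], p ++ [q])) ∧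
      pvInv e (ay ++ [PySem.Int.floordiv s e]) buf' k' s' pos' := by
  obtain ⟨hk, hs, hcase⟩ := hI
  set v := PySem.Int.floordiv s e with hv
  rcases hcase with ⟨hbuf, hlen, hpos⟩ | ⟨T, d, R, hbuf, hT, hblen, hw⟩
  · -- filling phase
    have hsmall : (ay ++ [v]).length ≤ e.toNat := by simp; omega
    have hWa : pvW e ay = ay := pvW_small (by omega)
    have hW' : pvW e (ay ++ [v]) = ay ++ [v] := pvW_small hsmall
    refine ⟨PySem.Int.floordiv (s + v) e, ay ++ [v], k + 1, s + v, 0, ?_, ?_, ?_, ?_, ?_⟩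
    · intro p
      simp only [pvStepB, hbuf, hpos]
      rw [if_pos (by rw [hk, hbuf]; exact hlen)]
    · intro p
      rw [pvStepA_eq e he ay p s hs, hW']
      have : (ay ++ [v]).sum = s + v := by simp [hs, hWa]
      rw [this]
    · rw [hk, hbuf]; simp
    · rw [hW']; simp [hs, hWa]
    · by_cases h2 : ((ay ++ [v]).length : Int) < e
      · exact Or.inl ⟨rfl, h2, rfl⟩
      · obtain ⟨d, R, hdr⟩ : ∃ d R, ay ++ [v] = d :: R := by
          cases ay with
          | nil => exact ⟨v, [], rfl⟩
          | cons a t => exact ⟨a, t ++ [v], rfl⟩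
        refine Or.inr ⟨[], d, R, by simp [hdr], by simp, ?_, ?_⟩
        · simp at h2 ⊢
          omega
        · rw [hW', hdr]; simp
  · -- full window: circular-buffer phase
    have hTlen : pos.toNat = T.length := by omega
    have hposlt : pos < (buf.length : Int) := by
      rw [hbuf]; simp; omega
    have hpos0 : 0 ≤ pos := by omega
    have hd : buf.getD pos.toNat 0 = d := by
      have hlt : pos.toNat < buf.length := by omega
      rw [List.getD_eq_getElem?_getD, List.getElem?_eq_getElem hlt]
      subst hbuf
      simp [List.getElem_append_right (show T.length ≤ pos.toNat by omega),
        show pos.toNat - T.length = 0 by omega]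
    have hset : buf.set pos.toNat v = T ++ v :: R := by
      rw [hTlen, hbuf, List.set_append_right _ _ (Nat.le_refl T.length)]
      simp
    have haylen : e.toNat ≤ ay.length := by
      have := congrArg List.length hw
      simp [pvW, hbuf] at this hblen
      omega
    have hW' : pvW e (ay ++ [v]) = (R ++ T) ++ [v] := by
      rw [pvW_append he haylen, hw]; simp
    have hsum : s = d + (R.sum + T.sum) := by
      rw [hs, hw]; simp
    refine ⟨PySem.Int.floordiv (s + v - d) e, T ++ v :: R, k, s + v - d,
      PySem.Int.mod (pos + 1) e, ?_, ?_, ?_, ?_, ?_⟩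
    · intro p
      simp only [pvStepB]
      rw [if_neg (by omega), hd, hset]
    · intro p
      rw [pvStepA_eq e he ay p s hs, hW']
      have : ((R ++ T) ++ [v]).sum = s + v - d := by simp [hsum]; ring
      rw [this]
    · rw [hk, hbuf]; simp
    · rw [hW']; simp [hsum]; ring
    · have hblen' : (T.length : Int) + 1 + (R.length : Int) = e := by
        rw [hbuf] at hblen; simp at hblen; omega
      cases R with
      | cons r R' =>
        have hlt : pos + 1 < e := by simp at hblen'; omega
        have hmod : PySem.Int.mod (pos + 1) e = pos + 1 := by
          rw [PySem.Int.mod_eq_emod_of_pos (by omega)]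
          exact Int.emod_eq_of_lt (by omega) hlt
        rw [hmod]
        refine Or.inr ⟨T ++ [v], r, R', by simp, by simp; omega, ?_, ?_⟩
        · simp; simp at hblen'; omega
        · rw [hW']; simp
      | nil =>
        have heq : pos + 1 = e := by simp at hblen'; omega
        have hmod : PySem.Int.mod (pos + 1) e = 0 := by
          rw [PySem.Int.mod_eq_emod_of_pos (by omega), heq, Int.emod_self]
        rw [hmod]
        obtain ⟨d', R'', hdr⟩ : ∃ d' R'', T ++ [v] = d' :: R'' := by
          cases T with
          | nil => exact ⟨v, [], rfl⟩
          | cons a t => exact ⟨a, t ++ [v], rfl⟩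
        refine Or.inr ⟨[], d', R'', by simp [hdr], by simp, ?_, ?_⟩
        · simp; simp at hblen'; omega
        · rw [hW']; simp [hdr]
    
lemma pvSim (e : Int) (he : 1 ≤ e) : ∀ (n : Nat) (ay buf : List Int) (k s pos : Int) (pred : List Int),
    pvInv e ay buf k s pos →
    ((pvStepA e)^[n] (ay, pred)).2 = ((pvStepB e)^[n] (buf, k, s, pos, pred)).2.2.2.2 := by
  intro n
  induction n with
  | zero => intro ay buf k s pos pred _; rfl
  | succ n ih =>
    intro ay buf k s pos pred hI
    obtain ⟨q, buf', k', s', pos', hB, hA, hI'⟩ := pvStep_pres e he ay buf k s pos hI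
    rw [Function.iterate_succ_apply, Function.iterate_succ_apply, hA pred, hB pred]
    exact ih _ _ _ _ _ _ hI'

lemma pvInv_init (e : Int) (he : 1 ≤ e) (y : List Int) :
    pvInv e y (PySem.List.slice y (some (-e)) none)
      ((PySem.List.slice y (some (-e)) none).length : Int)
      (PySem.List.slice y (some (-e)) none).sum 0 := by
  rw [pvSlice_eq_W e he]
  refine ⟨rfl, rfl, ?_⟩
  by_cases h : (y.length : Int) < e
  · exact Or.inl ⟨pvW_small (by omega), h, rfl⟩
  · have hlen : (pvW e y).length = e.toNat := by
      simp [pvW]; omega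
    cases hWc : pvW e y with
    | nil => rw [hWc] at hlen; simp at hlen; omega
    | cons d R =>
      refine Or.inr ⟨[], d, R, by rw [List.nil_append, ← hWc], by simp, ?_, by rw [List.append_nil, ← hWc]⟩
      rw [hWc] at hlen
      simp at hlen ⊢
      omega

-- the ports' loop bodies on arrays, and the bridge to the list model
def pvAStep (e : Int) (st : Array Int × Array Int) : Array Int × Array Int :=
  let new_y := st.1.push (PySem.Int.floordiv (pvArrTail st.1 e).sum e)
  (new_y, st.2.push (PySem.Int.floordiv (pvArrTail new_y e).sum e))

def pvBStep (e : Int) (st : Array Int × Int × Int × Int × Array Int) :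
    Array Int × Int × Int × Int × Array Int :=
  let v := PySem.Int.floordiv st.2.2.1 e
  if st.2.1 < e then
    (st.1.push v, st.2.1 + 1, st.2.2.1 + v, st.2.2.2.1,
      st.2.2.2.2.push (PySem.Int.floordiv (st.2.2.1 + v) e))
  else
    (st.1.setIfInBounds st.2.2.2.1.toNat v, st.2.1,
      st.2.2.1 + v - st.1.getD st.2.2.2.1.toNat 0,
      PySem.Int.mod (st.2.2.2.1 + 1) e,
      st.2.2.2.2.push (PySem.Int.floordiv (st.2.2.1 + v - st.1.getD st.2.2.2.1.toNat 0) e))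

lemma pvArrTail_toList (a : Array Int) (e : Int) :
    (pvArrTail a e).toList = PySem.List.slice a.toList (some (-e)) none := by
  rw [PySem.List.slice_some_none]
  simp only [pvArrTail, Array.toList_extract, List.extract_eq_take_drop]
  rw [Array.length_toList]
  exact List.take_of_length_le (by simp [Array.length_toList])

lemma pvArrGetD (a : Array Int) (i : Nat) : a.getD i 0 = a.toList.getD i 0 := by
  rw [Array.getD_eq_getD_getElem?, List.getD_eq_getElem?_getD]
  simp

lemma pvAStep_toList (e : Int) (st : Array Int × Array Int) :
    ((pvAStep e st).1.toList, (pvAStep e st).2.toList) = pvStepA e (st.1.toList, st.2.toList) := by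
  simp only [pvAStep, pvStepA, ← Array.sum_toList, Array.toList_push, pvArrTail_toList]

lemma pvBStep_toList (e : Int) (st : Array Int × Int × Int × Int × Array Int) :
    ((pvBStep e st).1.toList, (pvBStep e st).2.1, (pvBStep e st).2.2.1, (pvBStep e st).2.2.2.1,
      (pvBStep e st).2.2.2.2.toList) =
      pvStepB e (st.1.toList, st.2.1, st.2.2.1, st.2.2.2.1, st.2.2.2.2.toList) := by
  by_cases h : st.2.1 < e <;>
    simp only [pvBStep, pvStepB, h, if_true, if_false, Array.toList_push,
      Array.toList_setIfInBounds, pvArrGetD]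

lemma pvIter_comm {σ τ : Type} (f : σ → σ) (g : τ → τ) (φ : σ → τ)
    (h : ∀ s, φ (f s) = g (φ s)) : ∀ (n : Nat) (s : σ), φ (f^[n] s) = g^[n] (φ s) := by
  intro n
  induction n with
  | zero => intro s; rfl
  | succ n ih =>
    intro s
    rw [Function.iterate_succ_apply, Function.iterate_succ_apply, ih, h]

lemma pvPortA_model (x y : List Int) (pyc e : Int) :
    get_crime_prediction x y pyc e =
      (PySem.List.pyRange 2023 (2023 + pyc) 1,
        ((pvStepA e)^[(PySem.List.pyRange 0 pyc 1).length] (y, ([] : List Int))).2) := by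
  show (PySem.List.pyRange 2023 (2023 + pyc) 1,
      ((PySem.List.pyRange 0 pyc 1).foldl (fun st _ => pvAStep e st)
        (y.toArray, #[])).2.toList) = _
  rw [pvFoldl_const]
  have h := pvIter_comm (pvAStep e) (pvStepA e)
    (fun st => (st.1.toList, st.2.toList)) (pvAStep_toList e)
    (PySem.List.pyRange 0 pyc 1).length (y.toArray, #[])
  rw [show ((pvAStep e)^[(PySem.List.pyRange 0 pyc 1).length] (y.toArray, #[])).2.toList
      = ((pvStepA e)^[(PySem.List.pyRange 0 pyc 1).length] (y, ([] : List Int))).2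
    from congrArg Prod.snd h]

lemma pvPortB_model (x y : List Int) (pyc e : Int) :
    get_crime_prediction_alt x y pyc e =
      (PySem.List.pyRange 2023 (2023 + pyc) 1,
        ((pvStepB e)^[(PySem.List.pyRange 0 (max pyc 0) 1).length]
          (PySem.List.slice y (some (-e)) none,
            ((PySem.List.slice y (some (-e)) none).length : Int),
            (PySem.List.slice y (some (-e)) none).sum, 0, ([] : List Int))).2.2.2.2) := by
  show (PySem.List.pyRange 2023 (2023 + pyc) 1,
      ((PySem.List.pyRange 0 (max pyc 0) 1).foldl (fun st _ => pvBStep e st)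
        (pvArrTail y.toArray e, ((pvArrTail y.toArray e).size : Int),
          (pvArrTail y.toArray e).sum, 0, #[])).2.2.2.2.toList) = _
  rw [pvFoldl_const]
  have hbuf : (pvArrTail y.toArray e).toList = PySem.List.slice y (some (-e)) none := by
    simpa using pvArrTail_toList y.toArray e
  have h := pvIter_comm (pvBStep e) (pvStepB e)
    (fun st => (st.1.toList, st.2.1, st.2.2.1, st.2.2.2.1, st.2.2.2.2.toList))
    (pvBStep_toList e)
    (PySem.List.pyRange 0 (max pyc 0) 1).length
    (pvArrTail y.toArray e, ((pvArrTail y.toArray e).size : Int),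
      (pvArrTail y.toArray e).sum, 0, #[])
  rw [show ((pvBStep e)^[(PySem.List.pyRange 0 (max pyc 0) 1).length]
        (pvArrTail y.toArray e, ((pvArrTail y.toArray e).size : Int),
          (pvArrTail y.toArray e).sum, 0, #[])).2.2.2.2.toList
      = ((pvStepB e)^[(PySem.List.pyRange 0 (max pyc 0) 1).length]
        ((pvArrTail y.toArray e).toList, ((pvArrTail y.toArray e).size : Int),
          (pvArrTail y.toArray e).sum, 0, ([] : List Int))).2.2.2.2
    from congrArg (fun t => t.2.2.2.2) h]
  rw [show ((pvArrTail y.toArray e).size : Int)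
      = ((PySem.List.slice y (some (-e)) none).length : Int) by
    rw [← hbuf, Array.length_toList]]
  rw [show (pvArrTail y.toArray e).sum = (PySem.List.slice y (some (-e)) none).sum by
    rw [← Array.sum_toList, hbuf]]
  rw [hbuf]

theorem get_crime_prediction_spec : Claim_equal_get_crime_prediction := by
  intro x y pyc e _hdom hpre
  unfold Spec_get_crime_prediction
  rw [pvPortA_model, pvPortB_model]
  have hlen : (PySem.List.pyRange 0 (max pyc 0) 1).length = (PySem.List.pyRange 0 pyc 1).length := by
    rw [PySem.List.length_pyRange_one, PySem.List.length_pyRange_one]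
    omega
  rw [hlen]
  by_cases hp : pyc ≤ 0
  · have h0 : (PySem.List.pyRange 0 pyc 1).length = 0 := by
      rw [PySem.List.length_pyRange_one]; omega
    rw [h0]
    rfl
  · have he : 1 ≤ e := by
      rcases hpre with he | h; exact he; omega
    exact congrArg _ (pvSim e he _ y _ _ _ 0 [] (pvInv_init e he y))
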